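-- pv_equiv track=rewrite | github.com/gmccreight/facture | facturedata/core.py | careful_merge_dicts
-- ===== SOURCE A (Python) =====
-- import copy
--
-- class ConfError(Exception):
--     pass
--
-- def careful_merge_dicts(d1, d2):
--     d1 = copy.deepcopy(d1)
--     d2 = copy.deepcopy(d2)
--     if any(d1[k] != d2[k] for k in d1.keys() & d2):
--         raise ConfError(
--             'There were overlapping keys in merging dictionaries: {}, {}'.format(d1, d2)
--         )
--     else:
--         d1.update(d2)
--         return d1
-- ===== SOURCE B (Python) =====
-- import copy
--
-- class ConfError(Exception):
--     pass
--
-- def careful_merge_dicts(d1, d2):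
--     d1 = copy.deepcopy(d1)
--     d2 = copy.deepcopy(d2)
--     merged = {**d1, **d2}
--     if merged != {**d2, **d1}:
--         raise ConfError(
--             'There were overlapping keys in merging dictionaries: {}, {}'.format(d1, d2)
--         )
--     return merged
-- ===== Notes on version B (the rewrite author's own statement) =====
-- stated objective: alternative
-- what changed: B detects conflicts by a symmetry test instead of per-key comparison: it builds both merges {**d1,**d2} and {**d2,**d1} and raises iff they differ as dicts (a shared key with different values is exactly what breaks the symmetry), returning the first merge; no key-set intersection, no per-key conflict loop, no update.
import Mathlib
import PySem

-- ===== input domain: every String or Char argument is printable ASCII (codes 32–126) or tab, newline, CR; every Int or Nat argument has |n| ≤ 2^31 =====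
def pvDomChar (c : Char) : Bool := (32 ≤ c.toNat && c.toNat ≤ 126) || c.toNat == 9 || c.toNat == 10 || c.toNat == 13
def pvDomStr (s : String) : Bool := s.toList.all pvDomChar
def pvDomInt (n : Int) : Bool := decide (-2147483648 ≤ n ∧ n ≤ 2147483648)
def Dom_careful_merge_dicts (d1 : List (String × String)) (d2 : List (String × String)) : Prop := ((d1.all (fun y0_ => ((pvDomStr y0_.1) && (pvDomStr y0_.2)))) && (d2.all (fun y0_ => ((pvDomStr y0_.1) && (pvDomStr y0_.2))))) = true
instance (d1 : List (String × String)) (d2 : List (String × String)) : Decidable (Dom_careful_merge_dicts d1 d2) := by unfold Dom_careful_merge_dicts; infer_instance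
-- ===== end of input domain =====

-- B replaces A's key-set-intersection conflict scan + update with a symmetry test: build both
-- merges {**d1,**d2} and {**d2,**d1}, raise iff they differ as dicts; objective: alternative.

-- ===== PORT A =====
-- assoc lists are the dicts' items; both ports view them through PySem.Dict (insertion order, unique keys)
def careful_merge_dicts (d1 : List (String × String)) (d2 : List (String × String)) : List (String × String) :=
  let D1 := PySem.Dict.ofList d1
  let D2 := PySem.Dict.ofList d2
  -- any(d1[k] != d2[k] for k in d1.keys() & d2): kv.2 = d1[kv.1] since dict keys are unique
  if D1.items.any (fun kv => (D2.get? kv.1).isSome && decide (D2.get? kv.1 ≠ some kv.2))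
  then []  -- Python raises ConfError here; excluded by Pre_careful_merge_dicts
  else (PySem.Dict.update D1 D2.items).items  -- d1.update(d2); return d1

-- ===== PORT B =====
-- Python's dict '==' ignores insertion order: ported exactly as mutual pointwise agreement
-- of the two finite maps (each item of one is looked up in the other).
def pvDictEq (a b : PySem.Dict String String) : Bool :=
  a.items.all (fun kv => b.get? kv.1 == some kv.2) &&
  b.items.all (fun kv => a.get? kv.1 == some kv.2)

def careful_merge_dicts_alt (d1 : List (String × String)) (d2 : List (String × String)) : List (String × String) :=
  let D1 := PySem.Dict.ofList d1
  let D2 := PySem.Dict.ofList d2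
  let merged := PySem.Dict.update D1 D2.items      -- {**d1, **d2}
  if pvDictEq merged (PySem.Dict.update D2 D1.items)  -- merged != {**d2, **d1} → raise
  then merged.items
  else []  -- Python raises ConfError here; excluded by Pre_careful_merge_dicts

-- ===== PRECONDITION & SPEC =====
-- Pre_ excludes exactly the inputs on which A raises ConfError (a key present in both dicts
-- with different values); B raises the same error there.
def Pre_careful_merge_dicts (d1 : List (String × String)) (d2 : List (String × String)) : Prop :=
  ∀ p ∈ (PySem.Dict.ofList d2).items,
    (PySem.Dict.ofList d1).get? p.1 = none ∨ (PySem.Dict.ofList d1).get? p.1 = some p.2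
instance (d1 : List (String × String)) (d2 : List (String × String)) : Decidable (Pre_careful_merge_dicts d1 d2) := by unfold Pre_careful_merge_dicts; infer_instance

def pvWitness_careful_merge_dicts : (List (String × String)) × (List (String × String)) :=
  ([("a", "1"), ("b", "2")], [("b", "2"), ("c", "3")])

def Spec_careful_merge_dicts (d1 : List (String × String)) (d2 : List (String × String)) (out : List (String × String)) : Prop := out = careful_merge_dicts_alt d1 d2
instance (d1 : List (String × String)) (d2 : List (String × String)) (out : List (String × String)) : Decidable (Spec_careful_merge_dicts d1 d2 out) := by unfold Spec_careful_merge_dicts; infer_instance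

-- ===== CLAIM (what is proved, stated in full; the proofs are below) =====
def Claim_equal_careful_merge_dicts : Prop := ∀ (d1 : List (String × String)) (d2 : List (String × String)), Dom_careful_merge_dicts d1 d2 → Pre_careful_merge_dicts d1 d2 → Spec_careful_merge_dicts d1 d2 (careful_merge_dicts d1 d2)

-- ===== LEMMAS AND PROOFS =====

-- an insert-fold leaves keys outside the list untouched
lemma pvGetFoldlNotMem (l : List (String × String)) (d : PySem.Dict String String) (k : String)
    (h : ∀ p ∈ l, p.1 ≠ k) :
    (l.foldl (fun d kv => d.insert kv.1 kv.2) d).get? k = d.get? k := by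
  induction l generalizing d with
  | nil => rfl
  | cons p rest ih =>
    simp only [List.foldl_cons]
    rw [ih _ (fun q hq => h q (List.mem_cons_of_mem _ hq)),
        PySem.Dict.get?_insert_of_ne _ _ (Ne.symm (h p List.mem_cons_self))]

-- an insert-fold over a nodup-key list returns the listed value on listed keys
lemma pvGetFoldlMem (l : List (String × String)) (d : PySem.Dict String String) (k : String)
    (v : String) (hmem : (k, v) ∈ l) (hnd : (l.map (·.1)).Nodup) :
    (l.foldl (fun d kv => d.insert kv.1 kv.2) d).get? k = some v := by
  induction l generalizing d with
  | nil => simp at hmem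
  | cons p rest ih =>
    simp only [List.map_cons, List.nodup_cons] at hnd
    rcases List.mem_cons.1 hmem with rfl | hrest
    · simp only [List.foldl_cons]
      rw [pvGetFoldlNotMem _ _ _ (fun q hq hqk => hnd.1 (List.mem_map.2 ⟨q, hq, hqk⟩)),
          PySem.Dict.get?_insert_self]
    · exact ih _ hrest hnd.2

-- under Pre_, the two merges agree pointwise
lemma pvUpdatesAgree (d1 d2 : List (String × String)) (hpre : Pre_careful_merge_dicts d1 d2)
    (k : String) :
    (PySem.Dict.update (PySem.Dict.ofList d1) (PySem.Dict.ofList d2).items).get? k =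
    (PySem.Dict.update (PySem.Dict.ofList d2) (PySem.Dict.ofList d1).items).get? k := by
  have nd1 := PySem.Dict.nodup_keys_ofList (κ := String) (ν := String) d1
  have nd2 := PySem.Dict.nodup_keys_ofList (κ := String) (ν := String) d2
  show ((PySem.Dict.ofList d2).items.foldl (fun d kv => d.insert kv.1 kv.2) (PySem.Dict.ofList d1)).get? k = ((PySem.Dict.ofList d1).items.foldl (fun d kv => d.insert kv.1 kv.2) (PySem.Dict.ofList d2)).get? k
  cases h2 : (PySem.Dict.ofList d2).get? k with
  | some v =>
    rw [pvGetFoldlMem _ _ _ v (PySem.Dict.mem_items_of_get?_eq_some _ h2) nd2]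
    rcases hpre (k, v) (PySem.Dict.mem_items_of_get?_eq_some _ h2) with h1 | h1
    · rw [pvGetFoldlNotMem _ _ _ (fun p hp hpk => by
        have := PySem.Dict.get?_of_mem_items _ hp nd1
        rw [hpk, h1] at this; simp at this), h2]
    · rw [pvGetFoldlMem _ _ _ v (PySem.Dict.mem_items_of_get?_eq_some _ h1) nd1]
  | none =>
    have hno2 : ∀ p ∈ (PySem.Dict.ofList d2).items, p.1 ≠ k := by
      rintro ⟨k', v'⟩ hp rfl
      have := PySem.Dict.get?_of_mem_items _ hp nd2
      rw [h2] at this; simp at this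
    rw [pvGetFoldlNotMem _ _ _ hno2]
    cases h1 : (PySem.Dict.ofList d1).get? k with
    | some w => rw [pvGetFoldlMem _ _ _ w (PySem.Dict.mem_items_of_get?_eq_some _ h1) nd1]
    | none =>
      rw [pvGetFoldlNotMem _ _ _ (fun p hp hpk => by
        have := PySem.Dict.get?_of_mem_items _ hp nd1
        rw [hpk, h1] at this; simp at this)]
      rw [h2]

-- keys of an update stay nodup
lemma pvNodupUpdate (d : PySem.Dict String String) (l : List (String × String))
    (h : d.keys.Nodup) : (PySem.Dict.update d l).keys.Nodup :=
  PySem.Dict.nodup_keys_update _ _ h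

-- pointwise agreement makes B's dict-equality test true
lemma pvDictEqTrue (a b : PySem.Dict String String) (hna : a.keys.Nodup) (hnb : b.keys.Nodup)
    (h : ∀ k, a.get? k = b.get? k) : pvDictEq a b = true := by
  unfold pvDictEq
  rw [Bool.and_eq_true, List.all_eq_true, List.all_eq_true]
  constructor
  · intro kv hkv
    rw [← h kv.1, PySem.Dict.get?_of_mem_items _ hkv hna]; simp
  · intro kv hkv
    rw [h kv.1, PySem.Dict.get?_of_mem_items _ hkv hnb]; simp

-- under Pre_, A's conflict test is false
lemma pvAnyFalse (d1 d2 : List (String × String)) (hpre : Pre_careful_merge_dicts d1 d2) :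
    (PySem.Dict.ofList d1).items.any
      (fun kv => ((PySem.Dict.ofList d2).get? kv.1).isSome
        && decide ((PySem.Dict.ofList d2).get? kv.1 ≠ some kv.2)) = false := by
  rw [List.any_eq_false]
  rintro ⟨k, v⟩ hkv
  have hget1 : (PySem.Dict.ofList d1).get? k = some v :=
    PySem.Dict.get?_of_mem_items _ hkv (PySem.Dict.nodup_keys_ofList d1)
  cases hget2 : (PySem.Dict.ofList d2).get? k with
  | none => simp
  | some v2 =>
    have hmem2 : (k, v2) ∈ (PySem.Dict.ofList d2).items :=
      PySem.Dict.mem_items_of_get?_eq_some _ hget2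
    rcases hpre (k, v2) hmem2 with hn | hs
    · simp [hget1] at hn
    · rw [hget1] at hs
      simp_all

-- ===== VERDICT (by name: the statement is the Claim_ definition above) =====
theorem careful_merge_dicts_spec : Claim_equal_careful_merge_dicts := by
  intro d1 d2 _ hpre
  unfold Spec_careful_merge_dicts careful_merge_dicts careful_merge_dicts_alt
  simp only []
  rw [pvAnyFalse d1 d2 hpre,
      pvDictEqTrue _ _ (pvNodupUpdate _ _ (PySem.Dict.nodup_keys_ofList d1))
        (pvNodupUpdate _ _ (PySem.Dict.nodup_keys_ofList d2)) (pvUpdatesAgree d1 d2 hpre)]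
  rfl
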